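-- pv_equiv track=rewrite | github.com/JoanWu5/-offer | 面试题61扑克牌中的顺子.py | isStraight
-- ===== SOURCE A (Python) =====
-- def isStraight(nums):
--     """
--     :type nums: List[int]
--     :rtype: bool
--     """
--     if len(nums)<5:
--         return False
--     nums.sort()
--     count = 0
--     gap = 0
--     for i in range(len(nums)):
--         if nums[i] == 0:
--             count+=1
--     for i in range(1,len(nums)):
--         if nums[i-1]>0:
--             if nums[i]==nums[i-1]:
--                 return False
--             gap+=nums[i]-nums[i-1]-1
--     if count>=gap:
--         return True
--     else:
--         return False
-- ===== SOURCE B (Python) =====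
-- def isStraight(nums):
--     # Single unsorted pass: hash-set duplicate detection + running min/max of the
--     # positive cards and a zero counter; no sort. Return-value equivalent to A
--     # (A sorts nums in place; B does not mutate its argument).
--     if len(nums) < 5:
--         return False
--     seen = set()
--     zeros = 0
--     lo = hi = None
--     for x in nums:
--         if x > 0:
--             if x in seen:
--                 return False
--             seen.add(x)
--             if lo is None or x < lo:
--                 lo = x
--             if hi is None or x > hi:
--                 hi = x
--         elif x == 0:
--             zeros += 1
--     if lo is None:
--         return True
--     return hi - lo <= zeros + len(seen) - 1
-- ===== Notes on version B (the rewrite author's own statement) =====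
-- stated objective: alternative
-- what changed: A sorts the list and makes two staged passes (zero count, then adjacent-pair duplicate check and gap accumulation); B never sorts: one unsorted pass maintains a hash set of positives for duplicate detection plus running min/max and a zero counter, then decides with max-min <= zeros + k - 1. B does not mutate nums (A sorts it in place); the equivalence is about the return value.
import Mathlib
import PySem

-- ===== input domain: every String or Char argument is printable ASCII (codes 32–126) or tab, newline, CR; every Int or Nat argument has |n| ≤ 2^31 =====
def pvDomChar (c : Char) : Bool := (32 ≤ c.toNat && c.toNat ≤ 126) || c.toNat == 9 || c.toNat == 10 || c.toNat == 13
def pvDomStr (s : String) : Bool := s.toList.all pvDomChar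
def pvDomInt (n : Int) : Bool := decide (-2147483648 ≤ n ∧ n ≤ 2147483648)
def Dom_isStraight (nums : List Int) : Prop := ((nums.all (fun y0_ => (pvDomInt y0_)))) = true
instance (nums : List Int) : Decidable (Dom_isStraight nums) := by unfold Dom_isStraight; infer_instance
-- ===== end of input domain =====

-- B replaces A's sort + two staged passes by ONE unsorted pass with a hash set of the
-- positive cards, running min/max and a zero counter (objective: alternative algorithm).
-- A sorts nums in place, B does not mutate; the equivalence proved is about the RETURN value.

-- ===== PORT A =====
-- the second for-loop of A: walks adjacent pairs, early-return False = none
def isStraightGapLoop : List Int → Int → Option Int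
  | x :: y :: rest, gap =>
    if x > 0 then
      if y == x then none
      else isStraightGapLoop (y :: rest) (gap + (y - x - 1))
    else isStraightGapLoop (y :: rest) gap
  | _, gap => some gap

def isStraight (nums : List Int) : Bool :=
  if nums.length < 5 then false
  else
    let s := PySem.List.sorted nums (fun x => x) false
    let count : Int := s.foldl (fun c x => if x == 0 then c + 1 else c) 0
    match isStraightGapLoop s 0 with
    | none => false
    | some gap => decide (count ≥ gap)

-- ===== PORT B =====
-- B's single for-loop: state = (seen set, zero count, running min, running max);
-- early return False = none
def isStraightAltLoop : List Int → PySem.Set Int → Int → Option Int → Option Int →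
    Option (PySem.Set Int × Int × Option Int × Option Int)
  | [], seen, zeros, lo, hi => some (seen, zeros, lo, hi)
  | x :: t, seen, zeros, lo, hi =>
    if x > 0 then
      if PySem.Set.contains seen x then none
      else
        isStraightAltLoop t (PySem.Set.add seen x) zeros
          (some (match lo with | none => x | some m => if x < m then x else m))
          (some (match hi with | none => x | some m => if x > m then x else m))
    else if x = 0 then isStraightAltLoop t seen (zeros + 1) lo hi
    else isStraightAltLoop t seen zeros lo hi

def isStraight_alt (nums : List Int) : Bool :=
  if nums.length < 5 then false
  else
    match isStraightAltLoop nums PySem.Set.empty 0 none none with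
    | none => false
    | some (seen, zeros, lo, hi) =>
      match lo, hi with
      | some l, some h => decide (h - l ≤ zeros + (seen.length : Int) - 1)
      | _, _ => true   -- lo = None: return True (hi is None exactly when lo is)

-- ===== PRECONDITION & SPEC =====
def Spec_isStraight (nums : List Int) (out : Bool) : Prop := out = isStraight_alt nums
instance (nums : List Int) (out : Bool) : Decidable (Spec_isStraight nums out) := by unfold Spec_isStraight; infer_instance

-- ===== CLAIM (what is proved, stated in full; the proofs are below) =====
def Claim_equal_isStraight : Prop := ∀ (nums : List Int), Dom_isStraight nums → Spec_isStraight nums (isStraight nums)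

-- ===== LEMMAS AND PROOFS =====

-- total gap of a strictly sorted positive run, in closed form
def gapOf : List Int → Int
  | [] => 0
  | x :: t => (x :: t).getLastD 0 - x - (t.length : Int)

def stepMin (o : Option Int) (x : Int) : Option Int :=
  some (match o with | none => x | some m => if x < m then x else m)

def stepMax (o : Option Int) (x : Int) : Option Int :=
  some (match o with | none => x | some m => if x > m then x else m)

theorem gapOf_cons_cons (x y : Int) (rest : List Int) :
    gapOf (x :: y :: rest) = (y - x - 1) + gapOf (y :: rest) := by
  simp [gapOf, List.getLastD_eq_getLast?]
  cases h : (y :: rest).getLast? with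
  | none => simp at h
  | some v => ring

theorem loop_char (s : List Int) (hs : s.Pairwise (· ≤ ·)) (g : Int) :
    isStraightGapLoop s g =
      if (s.filter (fun x => x > 0)).Nodup
      then some (g + gapOf (s.filter (fun x => x > 0)))
      else none := by
  induction s generalizing g with
  | nil => simp [isStraightGapLoop, gapOf]
  | cons x t ih =>
    cases t with
    | nil =>
      simp only [isStraightGapLoop, List.filter]
      by_cases hx : x > 0 <;> simp [hx, gapOf]
    | cons y rest =>
      have hxy : x ≤ y := (List.pairwise_cons.mp hs).1 y (by simp)
      have hxall : ∀ z ∈ y :: rest, x ≤ z := (List.pairwise_cons.mp hs).1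
      have hs' : (y :: rest).Pairwise (· ≤ ·) := (List.pairwise_cons.mp hs).2
      by_cases hx : x > 0
      · have hyall : ∀ z ∈ y :: rest, (0:Int) < z := fun z hz => lt_of_lt_of_le hx (hxall z hz)
        have hfself : (y :: rest).filter (fun x => x > 0) = y :: rest :=
          List.filter_eq_self.mpr (fun z hz => by simpa using hyall z hz)
        have hfall : (x :: y :: rest).filter (fun x => x > 0) = x :: y :: rest := by
          rw [List.filter_cons_of_pos (by simpa using hx), hfself]
        by_cases heq : y = x
        · have : ¬ ((x :: y :: rest).filter (fun x => x > 0)).Nodup := by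
            rw [hfall]; subst heq; simp
          simp [isStraightGapLoop, hx, heq]
        · have hxlt : ∀ z ∈ y :: rest, x < z := by
            intro z hz
            rcases List.mem_cons.mp hz with rfl | hz'
            · omega
            · exact lt_of_lt_of_le (lt_of_le_of_ne hxy (Ne.symm heq)) ((List.pairwise_cons.mp hs').1 z hz')
          have hnd : ((x :: y :: rest).filter (fun x => x > 0)).Nodup ↔ ((y :: rest).filter (fun x => x > 0)).Nodup := by
            rw [hfall, hfself, List.nodup_cons]
            constructor
            · exact fun h => h.2
            · intro h
              exact ⟨fun hmem => absurd (hxlt x hmem) (lt_irrefl x), h⟩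
          have hloop : isStraightGapLoop (x :: y :: rest) g
              = isStraightGapLoop (y :: rest) (g + (y - x - 1)) := by
            simp [isStraightGapLoop, hx, heq]
          rw [hloop, ih hs']
          by_cases hnd' : ((y :: rest).filter (fun x => x > 0)).Nodup
          · rw [if_pos hnd', if_pos (hnd.mpr hnd'), hfall, hfself, gapOf_cons_cons]
            ring_nf
          · rw [if_neg hnd', if_neg (fun h => hnd' (hnd.mp h))]
      · have hfx : (x :: y :: rest).filter (fun x => x > 0) = (y :: rest).filter (fun x => x > 0) :=
          List.filter_cons_of_neg (by simpa using hx)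
        have hloop : isStraightGapLoop (x :: y :: rest) g = isStraightGapLoop (y :: rest) g := by
          simp [isStraightGapLoop, hx]
        rw [hloop, ih hs', hfx]

theorem count_fold (s : List Int) :
    s.foldl (fun c x => if x == 0 then c + 1 else c) (0:Int) = (s.count 0 : Int) := by
  have h := PySem.List.foldl_beq_add_one (l := s) (v := (0:Int)) (a := (0:Int))
  simpa using h

-- B's loop, characterised: none iff a positive repeats; else it returns the positives
-- (in order of first traversal), the zero count, and fold-min/fold-max of the positives.
theorem altLoop_char (l : List Int) : ∀ (seen : List Int), seen.Nodup → ∀ (zeros : Int) (lo hi : Option Int),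
    isStraightAltLoop l seen zeros lo hi =
      if (seen ++ l.filter (fun x => x > 0)).Nodup
      then some (seen ++ l.filter (fun x => x > 0), zeros + (l.count 0 : Int),
                 (l.filter (fun x => x > 0)).foldl stepMin lo,
                 (l.filter (fun x => x > 0)).foldl stepMax hi)
      else none := by
  induction l with
  | nil => intro seen hnd zeros lo hi; simp [isStraightAltLoop, hnd]
  | cons x t ih =>
    intro seen hnd zeros lo hi
    by_cases hx : x > 0
    · rw [List.filter_cons_of_pos (by simpa using hx)]
      by_cases hc : x ∈ seen
      · have hnnd : ¬ (seen ++ x :: t.filter (fun x => x > 0)).Nodup := by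
          intro h
          rw [List.nodup_append] at h
          exact (h.2.2 x hc x (List.mem_cons_self ..)) rfl
        simp [isStraightAltLoop, PySem.Set.contains, hx, hc, hnnd]
      · have hadd : PySem.Set.add seen x = seen ++ [x] := by
          simp [PySem.Set.add, PySem.Set.contains, hc]
        have hnd' : (seen ++ [x]).Nodup := by
          have h1 : (x :: seen).Nodup := List.nodup_cons.mpr ⟨hc, hnd⟩
          exact (List.perm_append_comm (l₁ := seen) (l₂ := [x])).symm.nodup h1
        have hrec : isStraightAltLoop (x :: t) seen zeros lo hi
            = isStraightAltLoop t (seen ++ [x]) zeros (stepMin lo x) (stepMax hi x) := by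
          simp [isStraightAltLoop, PySem.Set.contains, hx, hc, stepMin, stepMax]
        rw [hrec, ih (seen ++ [x]) hnd' zeros (stepMin lo x) (stepMax hi x)]
        have hcount : t.count 0 = (x :: t).count 0 := by
          have hne : ¬ (x = (0:Int)) := by omega
          simp [hne]
        simp only [List.append_assoc, List.singleton_append, List.foldl_cons, hcount]
    · rw [List.filter_cons_of_neg (by simpa using hx)]
      by_cases hz : x = 0
      · have hrec : isStraightAltLoop (x :: t) seen zeros lo hi
            = isStraightAltLoop t seen (zeros + 1) lo hi := by
          simp [isStraightAltLoop, hz]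
        rw [hrec, ih seen hnd (zeros + 1) lo hi]
        have hcc : ((x :: t).count 0 : Int) = (t.count 0 : Int) + 1 := by
          subst hz; simp
        rw [hcc]; ring_nf
      · have hrec : isStraightAltLoop (x :: t) seen zeros lo hi
            = isStraightAltLoop t seen zeros lo hi := by
          simp [isStraightAltLoop, hx, hz]
        rw [hrec, ih seen hnd zeros lo hi]
        have hcc : (t.count 0 : Int) = ((x :: t).count 0 : Int) := by
          simp [hz]
        rw [hcc]

-- fold-min over a nonempty list is its minimum
theorem foldl_stepMin_some (l : List Int) : ∀ (a : Int),
    ∃ m, l.foldl stepMin (some a) = some m ∧ (m = a ∨ m ∈ l) ∧ m ≤ a ∧ ∀ y ∈ l, m ≤ y := by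
  induction l with
  | nil => intro a; exact ⟨a, rfl, Or.inl rfl, le_refl a, by simp⟩
  | cons x t ih =>
    intro a
    have hstep : stepMin (some a) x = some (if x < a then x else a) := rfl
    obtain ⟨m, hm, hmem, hle, hall⟩ := ih (if x < a then x else a)
    refine ⟨m, by simpa [hstep] using hm, ?_, ?_, ?_⟩
    · rcases hmem with h | h
      · by_cases hxa : x < a
        · exact Or.inr (by simp [h, hxa])
        · exact Or.inl (by simpa [hxa] using h)
      · exact Or.inr (by simp [h])
    · split at hle <;> omega
    · intro y hy
      rcases List.mem_cons.mp hy with rfl | hy'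
      · split at hle <;> omega
      · exact hall y hy'

theorem foldl_stepMax_some (l : List Int) : ∀ (a : Int),
    ∃ m, l.foldl stepMax (some a) = some m ∧ (m = a ∨ m ∈ l) ∧ a ≤ m ∧ ∀ y ∈ l, y ≤ m := by
  induction l with
  | nil => intro a; exact ⟨a, rfl, Or.inl rfl, le_refl a, by simp⟩
  | cons x t ih =>
    intro a
    have hstep : stepMax (some a) x = some (if x > a then x else a) := rfl
    obtain ⟨m, hm, hmem, hle, hall⟩ := ih (if x > a then x else a)
    refine ⟨m, by simpa [hstep] using hm, ?_, ?_, ?_⟩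
    · rcases hmem with h | h
      · by_cases hxa : x > a
        · exact Or.inr (by simp [h, hxa])
        · exact Or.inl (by simpa [hxa] using h)
      · exact Or.inr (by simp [h])
    · split at hle <;> omega
    · intro y hy
      rcases List.mem_cons.mp hy with rfl | hy'
      · split at hle <;> omega
      · exact hall y hy'

-- in a ≤-sorted nonempty list every element is at most the last one
theorem le_getLastD_of_pairwise : ∀ (l : List Int), l.Pairwise (· ≤ ·) →
    ∀ y ∈ l, y ≤ l.getLastD 0 := by
  intro l
  induction l with
  | nil => intro _ y hy; simp at hy
  | cons x t ih =>
    intro hp y hy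
    cases t with
    | nil => simp at hy; simp [hy]
    | cons z r =>
      have hp' := (List.pairwise_cons.mp hp).2
      have hlast : (x :: z :: r).getLastD 0 = (z :: r).getLastD 0 := by simp
      rw [hlast]
      rcases List.mem_cons.mp hy with rfl | hy'
      · have hz : y ≤ z := (List.pairwise_cons.mp hp).1 z (by simp)
        exact le_trans hz (ih hp' z (by simp))
      · exact ih hp' y hy'

theorem main_eq (nums : List Int) :
    (match isStraightGapLoop (PySem.List.sorted nums (fun x => x) false) 0 with
     | none => false
     | some gap => decide ((PySem.List.sorted nums (fun x => x) false).foldl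
         (fun c x => if x == 0 then c + 1 else c) (0:Int) ≥ gap))
    = (match isStraightAltLoop nums PySem.Set.empty 0 none none with
       | none => false
       | some (seen, zeros, lo, hi) =>
         match lo, hi with
         | some l, some h => decide (h - l ≤ zeros + (seen.length : Int) - 1)
         | _, _ => true) := by
  rw [loop_char (PySem.List.sorted nums (fun x => x) false)
      (PySem.List.sorted_pairwise nums (fun x => x)) 0, count_fold]
  simp only [PySem.Set.empty]
  rw [altLoop_char nums [] List.nodup_nil 0 none none]
  simp only [List.nil_append, zero_add]
  set s := PySem.List.sorted nums (fun x => x) false with hs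
  have hsp : s.Pairwise (· ≤ ·) := PySem.List.sorted_pairwise nums (fun x => x)
  have hperm0 : s.Perm nums := PySem.List.sorted_perm nums (fun x => x) false
  set spos := s.filter (fun x => x > 0) with hspos
  set pos := nums.filter (fun x => x > 0) with hpos
  have hperm : spos.Perm pos := hperm0.filter _
  have hsposp : spos.Pairwise (· ≤ ·) := List.Pairwise.filter _ hsp
  have hcnt : (s.count 0 : Int) = (nums.count 0 : Int) :=
    congrArg (fun n : Nat => (n : Int)) (hperm0.count_eq 0)
  by_cases hnd : pos.Nodup
  · rw [if_pos hnd, if_pos (hperm.nodup_iff.mpr hnd)]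
    cases hpc : pos with
    | nil =>
      have hse : spos = [] := by
        have hp2 := hperm; rw [hpc] at hp2
        exact hp2.eq_nil
      rw [hse]
      exact decide_eq_true (by simp [gapOf] : ((s.count 0 : Int) ≥ gapOf []))
    | cons p q =>
      rw [hpc] at hperm
      have hsne : spos ≠ [] := by
        intro h
        rw [h] at hperm
        exact absurd hperm.symm.eq_nil (by simp)
      obtain ⟨x, t, hxt⟩ : ∃ x t, spos = x :: t := by
        cases hE : spos with
        | nil => exact absurd hE hsne
        | cons a b => exact ⟨a, b, rfl⟩
      have hfoldmin : (p :: q).foldl stepMin none = q.foldl stepMin (some p) := rfl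
      have hfoldmax : (p :: q).foldl stepMax none = q.foldl stepMax (some p) := rfl
      obtain ⟨m, hm, hmmem, hmle, hmall⟩ := foldl_stepMin_some q p
      obtain ⟨M, hM, hMmem, hMle, hMall⟩ := foldl_stepMax_some q p
      have hmmem' : m ∈ p :: q := by
        rcases hmmem with h | h
        · simp [h]
        · simp [h]
      have hMmem' : M ∈ p :: q := by
        rcases hMmem with h | h
        · simp [h]
        · simp [h]
      have hmall' : ∀ y ∈ p :: q, m ≤ y := by
        intro y hy
        rcases List.mem_cons.mp hy with rfl | hy'
        · exact hmle
        · exact hmall y hy'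
      have hMall' : ∀ y ∈ p :: q, y ≤ M := by
        intro y hy
        rcases List.mem_cons.mp hy with rfl | hy'
        · exact hMle
        · exact hMall y hy'
      have hxmem : x ∈ p :: q := hperm.mem_iff.mp (by rw [hxt]; simp)
      have hxall : ∀ y ∈ spos, x ≤ y := by
        intro y hy
        rw [hxt] at hy
        have hp3 := hxt ▸ hsposp
        rcases List.mem_cons.mp hy with rfl | hy'
        · exact le_refl _
        · exact (List.pairwise_cons.mp hp3).1 y hy'
      have hmx : m = x := by
        have h1 : m ≤ x := hmall' x hxmem
        have h2 : x ≤ m := hxall m (hperm.mem_iff.mpr hmmem')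
        omega
      have hLmem : spos.getLastD 0 ∈ spos := by
        rw [hxt, List.getLastD_cons]
        exact List.getLastD_mem_cons
      have hML : M = (x :: t).getLastD 0 := by
        have h1 : spos.getLastD 0 ≤ M := hMall' _ (hperm.mem_iff.mp hLmem)
        have h2 : M ≤ spos.getLastD 0 :=
          le_getLastD_of_pairwise spos hsposp M (hperm.mem_iff.mpr hMmem')
        rw [← hxt]; omega
      have hlenq : (((p :: q).length : Nat) : Int) = (t.length : Int) + 1 := by
        rw [← hperm.length_eq, hxt]; simp only [List.length_cons]; push_cast; ring
      rw [hxt, hfoldmin, hfoldmax, hm, hM]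
      have hiff : ((s.count 0 : Int) ≥ gapOf (x :: t))
          ↔ (M - m ≤ (nums.count 0 : Int) + (((p :: q).length : Nat) : Int) - 1) := by
        rw [hmx, hML, hlenq, hcnt]
        simp only [gapOf]
        omega
      exact decide_eq_decide.mpr hiff
  · rw [if_neg hnd, if_neg (fun h => hnd (hperm.nodup_iff.mp h))]

-- ===== VERDICT (by name: the statement is the Claim_ definition above) =====
theorem isStraight_spec : Claim_equal_isStraight := by
  intro nums _
  unfold Spec_isStraight isStraight isStraight_alt
  by_cases hlen : nums.length < 5
  · simp [hlen]
  · rw [if_neg hlen, if_neg hlen]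
    exact main_eq nums
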